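-- pv_equiv track=rewrite | github.com/compzombie/HTS-Challenges | HTSPro1Complete.py | createHash
-- ===== SOURCE A (Python) =====
-- def wordToSum(word):
--
--     sum = 0
--
--     for c in word:
--         sum += ord(c)
--
--     return sum
--
-- def createHash(data):
--
--     table = {}
--
--     for d in data:
--
--         sum = wordToSum(d)
--
--
--         if not sum in table.keys():
--             table[sum] = []
--
--         table[sum].append(d)
--
--     return table
-- ===== SOURCE B (Python) =====
-- def wordToSum(word):
--     return sum(ord(c) for c in word)
--
-- def createHash(data):
--     sums = [wordToSum(w) for w in data]
--     return {s: [w for w, t in zip(data, sums) if t == s]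
--             for s in dict.fromkeys(sums)}
-- ===== Notes on version B (the rewrite author's own statement) =====
-- stated objective: alternative
-- what changed: A buckets words in a single pass, appending each word to a hash-table entry keyed by its running character-code sum; B instead precomputes all sums once, then builds the table as a dict comprehension over the distinct sums, collecting each bucket with a filter over the zipped (word, sum) pairs.
import Mathlib
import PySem

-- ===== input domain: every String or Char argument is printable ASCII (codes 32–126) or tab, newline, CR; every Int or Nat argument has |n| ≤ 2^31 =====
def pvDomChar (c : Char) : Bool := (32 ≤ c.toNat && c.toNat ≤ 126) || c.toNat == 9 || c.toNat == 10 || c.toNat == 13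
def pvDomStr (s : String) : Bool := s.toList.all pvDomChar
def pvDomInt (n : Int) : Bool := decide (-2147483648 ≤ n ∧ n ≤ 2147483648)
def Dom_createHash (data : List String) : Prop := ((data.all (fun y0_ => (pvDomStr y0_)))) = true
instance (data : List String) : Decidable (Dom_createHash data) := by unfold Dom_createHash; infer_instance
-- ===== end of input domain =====

-- B replaces A's single-pass hash-bucketing with a comprehension: precompute all sums,
-- then map each distinct sum to the filtered bucket (objective: alternative, not faster).

-- ===== PORT A =====
-- A's wordToSum: accumulator loop over the characters
def wordToSum (word : String) : Int :=
  word.toList.foldl (fun s c => s + (c.toNat : Int)) 0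

def createHash (data : List String) : List (Int × List String) :=
  (data.foldl (fun table d =>
      let s := wordToSum d
      let table := if table.contains s then table else table.insert s ([] : List String)
      table.insert s (table.getD s [] ++ [d]))
    (PySem.Dict.empty : PySem.Dict Int (List String))).items

-- ===== PORT B =====
-- B's wordToSum: sum of the mapped character codes
def charSum (word : String) : Int :=
  (word.toList.map (fun c => (c.toNat : Int))).sum

def createHash_alt (data : List String) : List (Int × List String) :=
  let sums := data.map charSum
  -- dict.fromkeys(sums) = distinct sums in first-occurrence order; each bucket filters the zip
  (PySem.List.dedup sums).map (fun s =>
    (s, ((data.zip sums).filter (fun p => p.2 == s)).map (fun p => p.1)))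

-- ===== PRECONDITION & SPEC =====
def Spec_createHash (data : List String) (out : List (Int × List String)) : Prop := out = createHash_alt data
instance (data : List String) (out : List (Int × List String)) : Decidable (Spec_createHash data out) := by unfold Spec_createHash; infer_instance

-- ===== CLAIM (what is proved, stated in full; the proofs are below) =====
def Claim_equal_createHash : Prop := ∀ (data : List String), Dom_createHash data → Spec_createHash data (createHash data)

-- ===== LEMMAS AND PROOFS =====

theorem charSum_eq_wordToSum (w : String) : charSum w = wordToSum w := by
  unfold charSum wordToSum
  induction w.toList using List.reverseRecOn with
  | nil => simp
  | append_singleton xs x ih => simp [ih]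

-- the loop body of A's port, named for the proofs
def aStep (table : PySem.Dict Int (List String)) (d : String) : PySem.Dict Int (List String) :=
  let s := wordToSum d
  let table := if table.contains s then table else table.insert s ([] : List String)
  table.insert s (table.getD s [] ++ [d])

theorem aStep_eq (t : PySem.Dict Int (List String)) (d : String) :
    aStep t d = (if t.contains (wordToSum d) then t else t.insert (wordToSum d) []).insert
      (wordToSum d)
      ((if t.contains (wordToSum d) then t else t.insert (wordToSum d) []).getD (wordToSum d) [] ++ [d]) := rfl

theorem loop_items (xs : List String) :
    (xs.foldl aStep (PySem.Dict.empty : PySem.Dict Int (List String))).items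
      = (PySem.List.dedup (xs.map wordToSum)).map
          (fun k => (k, xs.filter (fun w => wordToSum w == k))) := by
  induction xs using List.reverseRecOn with
  | nil => rfl
  | append_singleton xs d ih =>
    rw [List.foldl_append, List.foldl_cons, List.foldl_nil]
    have hkeys : (xs.foldl aStep (PySem.Dict.empty : PySem.Dict Int (List String))).keys
        = PySem.List.dedup (xs.map wordToSum) := by
      show List.map Prod.fst _ = _
      rw [ih, List.map_map]; simp [Function.comp_def]
    have hnodup : (xs.foldl aStep (PySem.Dict.empty : PySem.Dict Int (List String))).keys.Nodup := by
      rw [hkeys, PySem.List.dedup_eq_ofList]; exact PySem.Set.nodup_ofList _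
    have hmapapp : (xs ++ [d]).map wordToSum = xs.map wordToSum ++ [wordToSum d] := by simp
    rw [aStep_eq]
    by_cases hmem : wordToSum d ∈ xs.map wordToSum
    · have hcont : (xs.foldl aStep (PySem.Dict.empty : PySem.Dict Int (List String))).contains (wordToSum d) = true := by
        rw [PySem.Dict.contains_iff_mem_keys, hkeys, PySem.List.mem_dedup]; exact hmem
      have hitem : (wordToSum d, xs.filter (fun w => wordToSum w == wordToSum d))
          ∈ (xs.foldl aStep (PySem.Dict.empty : PySem.Dict Int (List String))).items := by
        rw [ih]
        exact List.mem_map_of_mem (by rwa [PySem.List.mem_dedup])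
      have hgetD : (xs.foldl aStep (PySem.Dict.empty : PySem.Dict Int (List String))).getD (wordToSum d) []
          = xs.filter (fun w => wordToSum w == wordToSum d) :=
        PySem.Dict.getD_of_mem_items _ hitem hnodup []
      have hded : PySem.List.dedup ((xs ++ [d]).map wordToSum) = PySem.List.dedup (xs.map wordToSum) := by
        rw [hmapapp, PySem.List.dedup_eq_ofList, PySem.Set.ofList_append_singleton,
          PySem.Set.add_of_mem (by rw [PySem.Set.mem_ofList]; exact hmem), PySem.List.dedup_eq_ofList]
      rw [hcont]
      simp only [if_true]
      rw [PySem.Dict.items_insert_of_contains _ _ hcont, ih, hgetD, hded, List.map_map]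
      apply List.map_congr_left
      intro k hk
      by_cases hks : k = wordToSum d
      · subst hks
        simp [List.filter_append]
      · have hb : (k == wordToSum d) = false := by simp [hks]
        have hb' : (wordToSum d == k) = false := by simp [Ne.symm hks]
        simp [hb', List.filter_append, hks]
    · have hcont : (xs.foldl aStep (PySem.Dict.empty : PySem.Dict Int (List String))).contains (wordToSum d) = false := by
        rw [Bool.eq_false_iff, Ne, PySem.Dict.contains_iff_mem_keys, hkeys, PySem.List.mem_dedup]
        exact hmem
      have hfilter : xs.filter (fun w => wordToSum w == wordToSum d) = [] := by
        apply List.filter_eq_nil_iff.mpr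
        intro w hw
        simp only [beq_iff_eq]
        intro h; exact hmem (h ▸ List.mem_map_of_mem hw)
      have hded : PySem.List.dedup ((xs ++ [d]).map wordToSum)
          = PySem.List.dedup (xs.map wordToSum) ++ [wordToSum d] := by
        rw [hmapapp, PySem.List.dedup_eq_ofList, PySem.Set.ofList_append_singleton,
          PySem.Set.add_of_not_mem (by rw [PySem.Set.mem_ofList]; exact hmem), PySem.List.dedup_eq_ofList]
      rw [hcont, if_neg (by simp), PySem.Dict.getD_insert_self,
        PySem.Dict.items_insert_of_contains _ _ (PySem.Dict.contains_insert_self _ _ _),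
        PySem.Dict.items_insert_of_not_contains _ _ hcont,
        hded, List.map_append, ih, List.map_map, List.map_append]
      congr 1
      · apply List.map_congr_left
        intro k hk
        have hks : k ≠ wordToSum d := by
          rw [PySem.List.mem_dedup] at hk
          intro h; exact hmem (h ▸ hk)
        have hb' : (wordToSum d == k) = false := by simp [Ne.symm hks]
        simp [hb', List.filter_append, hks]
      · simp [hfilter, List.filter_append]

-- B's bucket: filtering the zip of xs with its own sums and projecting back
-- is the plain filter of xs
theorem zip_filter_fst (f : String → Int) (k : Int) :
    ∀ xs : List String,
    ((xs.zip (xs.map f)).filter (fun p => p.2 == k)).map (fun p => p.1)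
      = xs.filter (fun w => f w == k) := by
  intro xs
  induction xs with
  | nil => rfl
  | cons x xs ih =>
    by_cases h : f x = k <;> simp [h, ih]

theorem createHash_alt_eq (data : List String) :
    createHash_alt data
      = (PySem.List.dedup (data.map wordToSum)).map
          (fun k => (k, data.filter (fun w => wordToSum w == k))) := by
  show (PySem.List.dedup (data.map charSum)).map
      (fun s => (s, ((data.zip (data.map charSum)).filter (fun p => p.2 == s)).map (fun p => p.1)))
    = _
  rw [funext charSum_eq_wordToSum]
  exact List.map_congr_left (fun k _ => by rw [zip_filter_fst])

-- ===== VERDICT (by name: the statement is the Claim_ definition above) =====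
theorem createHash_spec : Claim_equal_createHash := by
  intro data _
  show (data.foldl aStep (PySem.Dict.empty : PySem.Dict Int (List String))).items = createHash_alt data
  rw [loop_items, createHash_alt_eq]
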